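-- pv_equiv track=rewrite | github.com/underloki/Cyprium | kernel/stegano/text/alphaspaces.py | do_unhide
-- ===== SOURCE A (Python) =====
-- import string
--
-- def _get_spaces(text):
--     ret = []
--     curr = 0
--     for c in text:
--         if c == ' ':
--             curr += 1
--         elif curr:
--             ret.append(curr)
--             curr = 0
--     return ret
--
-- def do_unhide(text):
--     chars = []
--     for sp in _get_spaces(text):
--         # 27 is 'NULL' char,  i.e. end of data!
--         if sp == 27:
--             break
--         elif 0 < sp < 27:
--             chars.append(string.ascii_lowercase[sp - 1])
--     return "".join(chars)
-- ===== SOURCE B (Python) =====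
-- import string
-- from itertools import takewhile
--
-- def do_unhide(text):
--     pos = [i for i, c in enumerate(text) if c != ' ']
--     gaps = [b - a - 1 for a, b in zip([-1] + pos, pos) if b - a > 1]
--     return ''.join(string.ascii_lowercase[g - 1]
--                    for g in takewhile(lambda g: g != 27, gaps) if g < 27)
-- ===== Notes on version B (the rewrite author's own statement) =====
-- stated objective: alternative
-- what changed: B never counts runs: it collects the indices of all non-space characters, derives each space-run length arithmetically as the gap between consecutive non-space indices (zip of the index list with itself shifted, seeded with -1), and decodes the gap list declaratively with takewhile/filter/map instead of A's stateful run counter plus break-loop.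
import Mathlib
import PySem

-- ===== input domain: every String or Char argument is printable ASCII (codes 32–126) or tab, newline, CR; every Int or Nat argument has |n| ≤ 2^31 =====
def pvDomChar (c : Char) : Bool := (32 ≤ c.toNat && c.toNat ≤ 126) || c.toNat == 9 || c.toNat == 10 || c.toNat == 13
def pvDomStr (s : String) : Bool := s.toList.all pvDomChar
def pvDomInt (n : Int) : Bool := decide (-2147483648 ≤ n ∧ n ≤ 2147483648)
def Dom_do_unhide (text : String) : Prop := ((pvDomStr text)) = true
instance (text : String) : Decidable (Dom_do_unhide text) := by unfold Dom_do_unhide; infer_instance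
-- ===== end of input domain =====

-- B decodes via the gaps between consecutive non-space character indices (no run counter):
-- an alternative, declarative decomposition of the same O(n) task; return values proved equal.

-- string.ascii_lowercase (module constant used by both Pythons)
def pvAsciiLower : List Char := "abcdefghijklmnopqrstuvwxyz".toList

-- ===== PORT A =====
def pvGetSpaces (text : String) : List Nat :=
  (text.toList.foldl
    (fun (s : List Nat × Nat) c =>
      if c = ' ' then (s.1, s.2 + 1)
      else if s.2 ≠ 0 then (s.1 ++ [s.2], 0)
      else (s.1, s.2)) ([], 0)).1

def pvLoopA : List Nat → List Char → List Char
  | [], chars => chars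
  | sp :: rest, chars =>
    if sp = 27 then chars
    else if 0 < sp ∧ sp < 27 then pvLoopA rest (chars ++ [pvAsciiLower.getD (sp - 1) 'a'])
    else pvLoopA rest chars

def do_unhide (text : String) : String := String.ofList (pvLoopA (pvGetSpaces text) [])

-- ===== PORT B =====
-- pos = [i for i, c in enumerate(text) if c != ' ']
-- gaps = [b - a - 1 for a, b in zip([-1] + pos, pos) if b - a > 1]
-- ''.join(ascii_lowercase[g-1] for g in takewhile(lambda g: g != 27, gaps) if g < 27)
-- (each gap g satisfies g ≥ 1, so the index g-1 is non-negative: toNat is exact here)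
def do_unhide_alt (text : String) : String :=
  let pos : List Int :=
    ((PySem.List.enumerate text.toList 0).filter (fun p => p.2 ≠ ' ')).map (fun p => p.1)
  let gaps : List Int :=
    ((((-1 : Int) :: pos).zip pos).filter (fun p => p.2 - p.1 > 1)).map (fun p => p.2 - p.1 - 1)
  String.ofList
    (((gaps.takeWhile (fun g => g ≠ 27)).filter (fun g => g < 27)).map
      (fun g => pvAsciiLower.getD (g - 1).toNat 'a'))

-- ===== PRECONDITION & SPEC =====
def Spec_do_unhide (text : String) (out : String) : Prop := out = do_unhide_alt text
instance (text : String) (out : String) : Decidable (Spec_do_unhide text out) := by unfold Spec_do_unhide; infer_instance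

-- ===== CLAIM (what is proved, stated in full; the proofs are below) =====
def Claim_equal_do_unhide : Prop := ∀ (text : String), Dom_do_unhide text → Spec_do_unhide text (do_unhide text)

-- ===== LEMMAS AND PROOFS =====

-- A's run counter, rephrased as a recursion: run lengths of (spaces^k ++ l), trailing run dropped
def runsCont : Nat → List Char → List Nat
  | _, [] => []
  | k, c :: rest =>
    if c = ' ' then runsCont (k + 1) rest
    else if k ≠ 0 then k :: runsCont 0 rest
    else runsCont 0 rest

-- the decoding loop, as a pure function of the run list
def pvEmit : List Nat → List Char
  | [] => []
  | n :: rest =>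
    if n = 27 then []
    else if 0 < n ∧ n < 27 then pvAsciiLower.getD (n - 1) 'a' :: pvEmit rest
    else pvEmit rest

theorem foldl_runs (l : List Char) : ∀ (acc : List Nat) (curr : Nat),
    (l.foldl (fun (s : List Nat × Nat) c =>
      if c = ' ' then (s.1, s.2 + 1)
      else if s.2 ≠ 0 then (s.1 ++ [s.2], 0)
      else (s.1, s.2)) (acc, curr)).1 = acc ++ runsCont curr l := by
  induction l with
  | nil => intro acc curr; simp [runsCont]
  | cons c rest ih =>
    intro acc curr
    rw [List.foldl_cons]
    by_cases hc : c = ' '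
    · rw [if_pos hc, runsCont, if_pos hc]
      exact ih acc (curr + 1)
    · rw [if_neg hc]
      by_cases hk : curr ≠ 0
      · rw [if_pos hk, runsCont, if_neg hc, if_pos hk, ih]
        simp
      · rw [if_neg hk, runsCont, if_neg hc, if_neg hk]
        simp only [ne_eq, not_not] at hk
        subst hk
        exact ih acc 0

theorem getSpaces_eq (text : String) : pvGetSpaces text = runsCont 0 text.toList := by
  unfold pvGetSpaces
  rw [foldl_runs]
  simp

theorem loopA_emit (R : List Nat) : ∀ chars : List Char, pvLoopA R chars = chars ++ pvEmit R := by
  induction R with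
  | nil => intro chars; simp [pvLoopA, pvEmit]
  | cons n rest ih =>
    intro chars
    by_cases h27 : n = 27
    · simp [pvLoopA, pvEmit, h27]
    · by_cases hr : 0 < n ∧ n < 27 <;> simp [pvLoopA, pvEmit, h27, hr, ih]

-- relative indices of the non-space characters of a list
def pvP : List Char → List Nat
  | [] => []
  | c :: rest => (if c = ' ' then [] else [0]) ++ (pvP rest).map (· + 1)

theorem enumerate_filter_map (l : List Char) : ∀ s : Int,
    ((PySem.List.enumerate l s).filter (fun p => p.2 ≠ ' ')).map (fun p => p.1)
      = (pvP l).map (fun (i : Nat) => (i : Int) + s) := by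
  induction l with
  | nil => intro s; simp [PySem.List.enumerate_nil, pvP]
  | cons c rest ih =>
    intro s
    rw [PySem.List.enumerate_cons, pvP]
    by_cases hc : c = ' '
    · simp only [List.filter_cons, hc]
      simp only [ne_eq, not_true_eq_false, decide_false]
      rw [if_neg (by simp), ih (s + 1)]
      simp [Function.comp]
      intro i _
      ring
    · simp only [List.filter_cons]
      rw [if_pos (by simp [hc]), if_neg (by simp [hc])]
      simp only [List.map_cons, List.map_append, List.map_map]
      rw [ih (s + 1)]
      simp [Function.comp]
      intro a _
      ring

-- the gap recursion: consecutive-difference gaps > 0, carried previous index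
def pvG : Int → List Int → List Int
  | _, [] => []
  | prev, i :: ps => (if i - prev > 1 then [i - prev - 1] else []) ++ pvG i ps

theorem zip_gaps (ps : List Int) : ∀ prev : Int,
    (((prev :: ps).zip ps).filter (fun p => p.2 - p.1 > 1)).map (fun p => p.2 - p.1 - 1)
      = pvG prev ps := by
  induction ps with
  | nil => intro prev; simp [pvG]
  | cons i ps ih =>
    intro prev
    rw [List.zip_cons_cons, pvG]
    by_cases h : i - prev > 1
    · rw [List.filter_cons, if_pos (by simpa using h), List.map_cons, ih]
      simp [h]
    · rw [List.filter_cons, if_neg (by simpa using h), ih]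
      simp [h]

theorem gaps_runs (l : List Char) : ∀ (prev : Int) (k : Nat),
    pvG prev ((pvP l).map (fun (i : Nat) => (i : Int) + (prev + 1 + k)))
      = (runsCont k l).map (fun (n : Nat) => (n : Int)) := by
  induction l with
  | nil => intro prev k; simp [pvP, pvG, runsCont]
  | cons c rest ih =>
    intro prev k
    rw [pvP, runsCont]
    by_cases hc : c = ' '
    · rw [if_pos hc, if_pos hc]
      simp only [List.nil_append, List.map_map]
      have : ((fun (i : Nat) => (i : Int) + (prev + 1 + k)) ∘ (· + 1))
          = fun (i : Nat) => (i : Int) + (prev + 1 + (k + 1 : Nat)) := by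
        funext i; simp [Function.comp]; ring
      rw [this, ih prev (k + 1)]
    · rw [if_neg hc, if_neg hc]
      simp only [List.map_cons, List.map_map, Nat.cast_zero, zero_add,
        List.singleton_append]
      rw [pvG]
      have harg : ((fun (i : Nat) => (i : Int) + (prev + 1 + k)) ∘ (· + 1))
          = fun (i : Nat) => (i : Int) + ((prev + 1 + k) + 1 + (0 : Nat)) := by
        funext i; simp [Function.comp]; ring
      rw [harg, ih (prev + 1 + k) 0]
      by_cases hk : k ≠ 0
      · have hgt : prev + 1 + (k : Int) - prev > 1 := by omega
        rw [if_pos hgt, if_pos hk]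
        simp only [List.map_cons]
        have hhd : prev + 1 + (k : Int) - prev - 1 = (k : Int) := by ring
        rw [hhd]
        simp
      · have hng : ¬ prev + 1 + (k : Int) - prev > 1 := by omega
        rw [if_neg hng, if_neg hk]
        simp

theorem runsCont_pos : ∀ (l : List Char) (k : Nat), ∀ n ∈ runsCont k l, 0 < n := by
  intro l
  induction l with
  | nil => intro k n hn; simp [runsCont] at hn
  | cons c rest ih =>
    intro k n hn
    rw [runsCont] at hn
    by_cases hc : c = ' '
    · rw [if_pos hc] at hn; exact ih (k + 1) n hn
    · rw [if_neg hc] at hn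
      by_cases hk : k ≠ 0
      · rw [if_pos hk] at hn
        rcases List.mem_cons.mp hn with h | h
        · omega
        · exact ih 0 n h
      · rw [if_neg hk] at hn; exact ih 0 n hn

theorem decode_emit : ∀ runs : List Nat, (∀ n ∈ runs, 0 < n) →
    ((((runs.map (fun (n : Nat) => (n : Int))).takeWhile (fun g => g ≠ 27)).filter
        (fun g => g < 27)).map (fun g => pvAsciiLower.getD (g - 1).toNat 'a'))
      = pvEmit runs := by
  intro runs
  induction runs with
  | nil => intro _; simp [pvEmit]
  | cons n rest ih =>
    intro hpos
    have hn : 0 < n := hpos n (List.mem_cons_self)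
    rw [List.map_cons, pvEmit]
    by_cases h27 : n = 27
    · rw [List.takeWhile_cons, if_neg (by simp [h27]), if_pos h27]
      simp
    · rw [List.takeWhile_cons, if_pos (by simp; omega), if_neg h27]
      by_cases hlt : n < 27
      · rw [List.filter_cons, if_pos (by simp; omega), List.map_cons,
          if_pos ⟨hn, hlt⟩, ih (fun m hm => hpos m (List.mem_cons_of_mem _ hm))]
        have hidx : ((n : Int) - 1).toNat = n - 1 := by omega
        rw [hidx]
      · have hne : ¬ (0 < n ∧ n < 27) := by omega
        rw [List.filter_cons, if_neg (by simp; omega),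
          if_neg hne, ih (fun m hm => hpos m (List.mem_cons_of_mem _ hm))]

-- ===== VERDICT (by name: the statement is the Claim_ definition above) =====
theorem do_unhide_spec : Claim_equal_do_unhide := by
  intro text _
  unfold Spec_do_unhide do_unhide do_unhide_alt
  rw [getSpaces_eq, loopA_emit, List.nil_append]
  simp only []
  rw [enumerate_filter_map text.toList 0, zip_gaps]
  have h0 : (pvP text.toList).map (fun (i : Nat) => (i : Int) + 0)
      = (pvP text.toList).map (fun (i : Nat) => (i : Int) + (-1 + 1 + (0 : Nat))) := by
    simp
  rw [h0, gaps_runs text.toList (-1) 0, decode_emit _ (runsCont_pos text.toList 0)]
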